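-- pv_equiv track=rewrite | github.com/MulongXie/NiCro-UIGaurd | element_detection/detect_text/Text.py | check_string_overlap
-- ===== SOURCE A (Python) =====
-- def check_string_overlap(left_text, right_text, lower_case=True, rm_uncommon_letters=True):
--     '''
--     "ghjk" + "jkl" = "ghjkl"
--     :return: cur
--     '''
--     lt_r = left_text[::-1]
--     rt_r = right_text[::-1]
--     if lower_case:
--         lt_r = lt_r.lower()
--         rt_r = rt_r.lower()
--     # check the duplicated part of the two texts
--     cur = 0
--     # if the last letter in the left text is abnormal, remove it
--     if rm_uncommon_letters:
--         i = 0
--         while i < len(lt_r) and ord(lt_r[i]) > 127: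
--             cur += 1
--             i += 1
--     for c in rt_r:
--         if cur == len(lt_r):
--             break
--         if c != lt_r[cur]:
--             continue
--         else:
--             cur += 1
--     return cur
-- ===== SOURCE B (Python) =====
-- def check_string_overlap(left_text, right_text, lower_case=True, rm_uncommon_letters=True):
--     lt_r = left_text[::-1]
--     rt_r = right_text[::-1]
--     if lower_case:
--         lt_r = lt_r.lower()
--         rt_r = rt_r.lower()
--     cur = 0
--     if rm_uncommon_letters:
--         while cur < len(lt_r) and ord(lt_r[cur]) > 127:
--             cur += 1
--     # instead of scanning rt_r char by char, jump with str.find and cut the searched part off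
--     rem = rt_r
--     while cur < len(lt_r):
--         i = rem.find(lt_r[cur])
--         if i == -1:
--             break
--         rem = rem[i + 1:]
--         cur += 1
--     return cur
-- ===== Notes on version B (the rewrite author's own statement) =====
-- stated objective: alternative
-- what changed: B replaces A's char-by-char scan of the reversed right text (advancing a match cursor on hits) with a loop over the remaining target characters that jumps directly via str.find and cuts off the searched prefix.
import Mathlib
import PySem

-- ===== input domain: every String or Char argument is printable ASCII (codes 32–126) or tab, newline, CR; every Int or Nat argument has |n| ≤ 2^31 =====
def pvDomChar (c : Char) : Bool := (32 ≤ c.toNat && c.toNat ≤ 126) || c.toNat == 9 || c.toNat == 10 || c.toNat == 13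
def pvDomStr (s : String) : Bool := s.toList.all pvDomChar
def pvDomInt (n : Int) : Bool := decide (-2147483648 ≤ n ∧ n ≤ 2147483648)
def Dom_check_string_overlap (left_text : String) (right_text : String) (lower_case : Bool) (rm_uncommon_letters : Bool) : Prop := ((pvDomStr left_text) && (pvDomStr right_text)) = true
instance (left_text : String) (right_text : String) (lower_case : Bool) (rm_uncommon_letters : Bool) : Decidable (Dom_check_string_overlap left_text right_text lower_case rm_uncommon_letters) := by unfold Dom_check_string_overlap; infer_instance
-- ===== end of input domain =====

-- B replaces A's char-by-char scan of the reversed right text with a find-and-cut loop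
-- over the remaining target characters (idiomatic decomposition; same cost).

-- ===== PORT A =====
-- while i < len(lt_r) and ord(lt_r[i]) > 127: cur += 1; i += 1   (cur and i move together)
def csoSkip (lt : List Char) (cur : Nat) (i : Nat) : Nat :=
  if h : i < lt.length ∧ 127 < (lt.getD i ' ').toNat then csoSkip lt (cur + 1) (i + 1)
  else cur
termination_by lt.length - i
decreasing_by omega

-- for c in rt_r: if cur == len(lt_r): break; if c != lt_r[cur]: continue; else: cur += 1
def csoALoop (lt : List Char) (rt : List Char) (cur : Nat) : Nat :=
  match rt with
  | [] => cur
  | c :: rs =>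
    if cur = lt.length then cur
    else if some c ≠ PySem.List.pyGet? lt (Int.ofNat cur) then csoALoop lt rs cur
    else csoALoop lt rs (cur + 1)

def check_string_overlap (left_text : String) (right_text : String) (lower_case : Bool) (rm_uncommon_letters : Bool) : Int :=
  -- s[::-1] is reversal (PySem.Str.slice?_none_none_neg_one)
  let lt_r0 := left_text.toList.reverse
  let rt_r0 := right_text.toList.reverse
  let lt_r := if lower_case then PySem.Chars.lower lt_r0 else lt_r0
  let rt_r := if lower_case then PySem.Chars.lower rt_r0 else rt_r0
  let cur0 := if rm_uncommon_letters then csoSkip lt_r 0 0 else 0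
  Int.ofNat (csoALoop lt_r rt_r cur0)

-- ===== PORT B =====
-- while cur < len(lt_r) and ord(lt_r[cur]) > 127: cur += 1   (B drives the skip by cur alone)
def csoSkipB (lt : List Char) (cur : Nat) : Nat :=
  if h : cur < lt.length ∧ 127 < (lt.getD cur ' ').toNat then csoSkipB lt (cur + 1)
  else cur
termination_by lt.length - cur
decreasing_by omega

-- while cur < len(lt_r): i = rem.find(lt_r[cur]); if i == -1: break; rem = rem[i+1:]; cur += 1
def csoBLoop (lt : List Char) (rem : List Char) (cur : Nat) : Nat :=
  if h : cur < lt.length then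
    if PySem.Chars.find rem [lt[cur]'h] = -1 then cur
    else csoBLoop lt (PySem.List.slice rem (some (PySem.Chars.find rem [lt[cur]'h] + 1)) none) (cur + 1)
  else cur
termination_by lt.length - cur
decreasing_by omega

def check_string_overlap_alt (left_text : String) (right_text : String) (lower_case : Bool) (rm_uncommon_letters : Bool) : Int :=
  let lt_r0 := left_text.toList.reverse
  let rt_r0 := right_text.toList.reverse
  let lt_r := if lower_case then PySem.Chars.lower lt_r0 else lt_r0
  let rt_r := if lower_case then PySem.Chars.lower rt_r0 else rt_r0
  let cur0 := if rm_uncommon_letters then csoSkipB lt_r 0 else 0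
  Int.ofNat (csoBLoop lt_r rt_r cur0)

-- ===== PRECONDITION & SPEC =====
def Spec_check_string_overlap (left_text : String) (right_text : String) (lower_case : Bool) (rm_uncommon_letters : Bool) (out : Int) : Prop := out = check_string_overlap_alt left_text right_text lower_case rm_uncommon_letters
instance (left_text : String) (right_text : String) (lower_case : Bool) (rm_uncommon_letters : Bool) (out : Int) : Decidable (Spec_check_string_overlap left_text right_text lower_case rm_uncommon_letters out) := by unfold Spec_check_string_overlap; infer_instance

-- ===== CLAIM (what is proved, stated in full; the proofs are below) =====
def Claim_equal_check_string_overlap : Prop := ∀ (left_text : String) (right_text : String) (lower_case : Bool) (rm_uncommon_letters : Bool), Dom_check_string_overlap left_text right_text lower_case rm_uncommon_letters → Spec_check_string_overlap left_text right_text lower_case rm_uncommon_letters (check_string_overlap left_text right_text lower_case rm_uncommon_letters)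

-- ===== LEMMAS AND PROOFS =====

-- A's skip (cur and i locked together) equals B's skip
lemma csoSkip_eq_skipB (lt : List Char) : ∀ n i, lt.length - i ≤ n → csoSkip lt i i = csoSkipB lt i := by
  intro n
  induction n with
  | zero =>
    intro i hi
    rw [csoSkip, csoSkipB]
    simp only [show ¬ (i < lt.length ∧ 127 < (lt.getD i ' ').toNat) from fun h => by omega,
      dite_false]
  | succ n ih =>
    intro i hi
    rw [csoSkip, csoSkipB]
    by_cases h : i < lt.length ∧ 127 < (lt.getD i ' ').toNat
    · simp only [h, dite_true]
      exact ih (i + 1) (by omega)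
    · simp only [h, dite_false]

lemma csoSkipB_le (lt : List Char) : ∀ n i, lt.length - i ≤ n → i ≤ lt.length → csoSkipB lt i ≤ lt.length := by
  intro n
  induction n with
  | zero =>
    intro i hi hle
    rw [csoSkipB]
    simp only [show ¬ (i < lt.length ∧ 127 < (lt.getD i ' ').toNat) from fun h => by omega,
      dite_false]
    exact hle
  | succ n ih =>
    intro i hi hle
    rw [csoSkipB]
    by_cases h : i < lt.length ∧ 127 < (lt.getD i ' ').toNat
    · simp only [h, dite_true]
      exact ih (i + 1) (by omega) (by omega)
    · simp only [h, dite_false]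
      exact hle

-- Chars.find.go shifted by one position
lemma find_go_succ (t : Char) : ∀ (rs : List Char) (k : Nat),
    PySem.Chars.find.go [t] rs (k + 1) =
      (if PySem.Chars.find.go [t] rs k = -1 then -1 else PySem.Chars.find.go [t] rs k + 1) := by
  intro rs
  induction rs with
  | nil => intro k; simp [PySem.Chars.find.go]
  | cons c rs ih =>
    intro k
    rw [PySem.Chars.find.go, PySem.Chars.find.go]
    by_cases h : List.isPrefixOf [t] (c :: rs) = true
    · simp [h]
    · simp only [h]
      exact ih (k + 1)

lemma find_go_nonneg (t : Char) : ∀ (rs : List Char) (k : Nat),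
    PySem.Chars.find.go [t] rs k = -1 ∨ 0 ≤ PySem.Chars.find.go [t] rs k := by
  intro rs
  induction rs with
  | nil => intro k; simp [PySem.Chars.find.go]
  | cons c rs ih =>
    intro k
    rw [PySem.Chars.find.go]
    by_cases h : List.isPrefixOf [t] (c :: rs) = true
    · simp [h]
    · simp only [h]
      exact ih (k + 1)

lemma find_nil (t : Char) : PySem.Chars.find ([] : List Char) [t] = -1 := by
  simp [PySem.Chars.find, PySem.Chars.find.go]

lemma find_cons (t c : Char) (rs : List Char) :
    PySem.Chars.find (c :: rs) [t] =
      (if c = t then 0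
       else if PySem.Chars.find rs [t] = -1 then -1 else PySem.Chars.find rs [t] + 1) := by
  rw [PySem.Chars.find, PySem.Chars.find, PySem.Chars.find.go]
  have hpre : (List.isPrefixOf [t] (c :: rs) = true) ↔ c = t := by
    simp [List.isPrefixOf]
    constructor
    · intro h; exact h.symm
    · intro h; exact h.symm
  by_cases h : c = t
  · simp [h]
  · simp only [show ¬ (List.isPrefixOf [t] (c :: rs) = true) from fun hh => h (hpre.mp hh),
      if_neg h]
    exact find_go_succ t rs 0

lemma find_nonneg (t : Char) (rs : List Char) (h : PySem.Chars.find rs [t] ≠ -1) :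
    0 ≤ PySem.Chars.find rs [t] := by
  rw [PySem.Chars.find] at *
  rcases find_go_nonneg t rs 0 with h0 | h0
  · exact absurd h0 h
  · exact h0

-- the main bridge: A's scan loop equals B's find-and-cut loop
lemma csoLoop_eq (lt : List Char) : ∀ (rt : List Char) (cur : Nat), cur ≤ lt.length →
    csoALoop lt rt cur = csoBLoop lt rt cur := by
  intro rt
  induction rt with
  | nil =>
    intro cur hcur
    rw [csoALoop, csoBLoop]
    by_cases h : cur < lt.length
    · simp [h, find_nil]
    · simp [h]
  | cons c rs ih =>
    intro cur hcur
    by_cases hlen : cur = lt.length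
    · rw [csoALoop, csoBLoop]
      simp [hlen]
    · have hlt : cur < lt.length := by omega
      have hget : PySem.List.pyGet? lt (Int.ofNat cur) = some (lt[cur]'hlt) := by
        simp [PySem.List.pyGet?, PySem.List.pyIdx?, hlt]
      by_cases hc : c = lt[cur]'hlt
      · -- match: both advance cur, B drops one char
        have hfind : PySem.Chars.find (c :: rs) [lt[cur]'hlt] = 0 := by
          rw [find_cons, if_pos hc]
        have hslice : PySem.List.slice (c :: rs) (some ((0 : Int) + 1)) none = rs := by
          have h1 := PySem.List.slice_from (c :: rs) (a := (0 : Int) + 1) (by norm_num)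
          simpa using h1
        rw [csoALoop, if_neg hlen, hget,
          if_neg (show ¬ some c ≠ some (lt[cur]'hlt) by simp [hc])]
        rw [csoBLoop, dif_pos hlt, hfind, if_neg (by norm_num : ¬ (0 : Int) = -1), hslice]
        exact ih (cur + 1) (by omega)
      · -- mismatch: A skips c, B's find skips it inside the same call
        have hstep : csoBLoop lt (c :: rs) cur = csoBLoop lt rs cur := by
          conv_lhs => rw [csoBLoop]
          conv_rhs => rw [csoBLoop]
          rw [dif_pos hlt, dif_pos hlt, find_cons, if_neg hc]
          by_cases hfr : PySem.Chars.find rs [lt[cur]'hlt] = -1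
          · simp [hfr]
          · have hnn := find_nonneg _ rs hfr
            have hne : PySem.Chars.find rs [lt[cur]'hlt] + 1 ≠ -1 := by omega
            rw [if_neg hfr, if_neg hne, if_neg hfr]
            congr 1
            set j := PySem.Chars.find rs [lt[cur]'hlt] with hj
            have h1 : PySem.List.slice (c :: rs) (some (j + 1 + 1)) none = (c :: rs).drop (j + 1 + 1).toNat :=
              PySem.List.slice_from _ (by omega)
            have h2 : PySem.List.slice rs (some (j + 1)) none = rs.drop (j + 1).toNat :=
              PySem.List.slice_from _ (by omega)
            rw [h1, h2, show (j + 1 + 1).toNat = (j + 1).toNat + 1 from by omega,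
              List.drop_succ_cons]
        rw [csoALoop, if_neg hlen, if_pos (by rw [hget]; simp [Ne, hc]), hstep]
        exact ih cur hcur

-- ===== VERDICT (by name: the statement is the Claim_ definition above) =====
theorem check_string_overlap_spec : Claim_equal_check_string_overlap := by
  intro l r lc rm _
  unfold Spec_check_string_overlap check_string_overlap check_string_overlap_alt
  simp only
  set lt := if lc then PySem.Chars.lower l.toList.reverse else l.toList.reverse with hlt
  have hskip : (if rm then csoSkip lt 0 0 else 0) = (if rm then csoSkipB lt 0 else 0) := by
    by_cases h : rm
    · simp [h, csoSkip_eq_skipB lt lt.length 0 (by omega)]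
    · simp [h]
  rw [hskip]
  congr 1
  apply csoLoop_eq
  by_cases h : rm
  · simp only [h, if_true]
    exact csoSkipB_le lt lt.length 0 (by omega) (by omega)
  · simp [h]
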